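-- pv_equiv track=rewrite | github.com/unrealshape/simc-apl-tracker | scripts/sync_apl.py | parse_class_spec
-- ===== SOURCE A (Python) =====
-- CLASSES = [
--     "deathknight", "demonhunter", "druid", "evoker", "hunter", "mage",
--     "monk", "paladin", "priest", "rogue", "shaman", "warlock", "warrior",
-- ]
--
-- def parse_class_spec(filename: str) -> tuple[str, str] | None:
--     """Extract class and spec from filename like 'warrior_arms.simc'."""
--     name = filename.removesuffix(".simc").removesuffix(".txt")
--     name = name.lower()
--     for cls in CLASSES:
--         if name.startswith(cls + "_"):
--             spec = name[len(cls) + 1:]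
--             if spec:
--                 return cls, spec
--     return None
-- ===== SOURCE B (Python) =====
-- CLASSES = [
--     "deathknight", "demonhunter", "druid", "evoker", "hunter", "mage",
--     "monk", "paladin", "priest", "rogue", "shaman", "warlock", "warrior",
-- ]
--
-- _CLASS_SET = frozenset(CLASSES)
--
-- def parse_class_spec(filename: str) -> tuple[str, str] | None:
--     """Extract class and spec from filename like 'warrior_arms.simc'."""
--     name = filename.removesuffix(".simc").removesuffix(".txt").lower()
--     head, _, tail = name.partition("_")
--     if head in _CLASS_SET and tail:
--         return head, tail
--     return None
-- ===== Notes on version B (the rewrite author's own statement) =====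
-- stated objective: idiomatic
-- what changed: Replaced the 13-way startswith loop over CLASSES by a single partition of the normalized name at its first underscore followed by an O(1) set-membership test of the head (valid because no class name contains an underscore).
import Mathlib
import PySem

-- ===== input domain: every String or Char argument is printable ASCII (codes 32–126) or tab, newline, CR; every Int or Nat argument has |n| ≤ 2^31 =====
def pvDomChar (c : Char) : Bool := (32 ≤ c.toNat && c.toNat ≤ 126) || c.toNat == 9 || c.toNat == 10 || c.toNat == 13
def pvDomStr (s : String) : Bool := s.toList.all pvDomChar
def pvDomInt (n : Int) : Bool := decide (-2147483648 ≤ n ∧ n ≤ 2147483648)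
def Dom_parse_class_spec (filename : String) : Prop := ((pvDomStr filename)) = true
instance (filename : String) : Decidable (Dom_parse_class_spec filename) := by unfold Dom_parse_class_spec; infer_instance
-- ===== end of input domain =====

-- B replaces A's 13-way startswith loop by one partition at the first underscore
-- plus a set membership test (idiomatic; same return value on every input).


-- ===== PORT A =====
-- the module constant CLASSES (shared by both ports, as in the Python module)
def CLASSES : List String := [
  "deathknight", "demonhunter", "druid", "evoker", "hunter", "mage",
  "monk", "paladin", "priest", "rogue", "shaman", "warlock", "warrior"]

-- str.removesuffix(suf): drop suf if s ends with it (exact for the non-empty suffixes used here; hand-ported, PySem has no removesuffix)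
def removesuffixC (s suf : List Char) : List Char :=
  if PySem.Chars.endswith s suf then s.take (s.length - suf.length) else s

-- the `for cls in CLASSES` loop of A, step for step
def loopA (name : List Char) : List String → Option (String × String)
  | [] => none
  | cls :: rest =>
    if PySem.Chars.startswith name (cls.toList ++ ['_']) then
      -- spec = name[len(cls) + 1:]
      let spec := PySem.List.slice name (some ((cls.toList.length : Int) + 1)) none
      if spec.isEmpty then loopA name rest
      else some (cls, String.ofList spec)
    else loopA name rest

def parse_class_spec (filename : String) : Option (String × String) :=
  let name := PySem.Chars.lower
    (removesuffixC (removesuffixC filename.toList ".simc".toList) ".txt".toList)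
  loopA name CLASSES

-- ===== PORT B =====
def CLASS_SET : List String := PySem.Set.ofList CLASSES

def parse_class_spec_alt (filename : String) : Option (String × String) :=
  let name := PySem.Chars.lower
    (removesuffixC (removesuffixC filename.toList ".simc".toList) ".txt".toList)
  -- head, _, tail = name.partition("_")  (hand-ported, exact: chars before / after the first '_')
  let head := name.takeWhile (fun c => c != '_')
  let tail := (name.dropWhile (fun c => c != '_')).tail
  if String.ofList head ∈ CLASS_SET ∧ tail ≠ [] then
    some (String.ofList head, String.ofList tail)
  else none

-- ===== PRECONDITION & SPEC =====
def Spec_parse_class_spec (filename : String) (out : Option (String × String)) : Prop := out = parse_class_spec_alt filename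
instance (filename : String) (out : Option (String × String)) : Decidable (Spec_parse_class_spec filename out) := by unfold Spec_parse_class_spec; infer_instance

-- ===== CLAIM (what is proved, stated in full; the proofs are below) =====
def Claim_equal_parse_class_spec : Prop := ∀ (filename : String), Dom_parse_class_spec filename → Spec_parse_class_spec filename (parse_class_spec filename)

-- ===== LEMMAS AND PROOFS =====

-- an underscore-free block before '_' is exactly what takeWhile keeps
theorem takeWhile_us (cls t : List Char) (hc : ∀ c ∈ cls, (c != '_') = true) :
    (cls ++ '_' :: t).takeWhile (fun c => c != '_') = cls := by
  induction cls with
  | nil => simp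
  | cons c cs ih =>
      have h1 : (c != '_') = true := hc c (by simp)
      simp only [List.cons_append, List.takeWhile_cons, h1, if_true]
      rw [ih (fun x hx => hc x (by simp [hx]))]

theorem drop_block (l t : List Char) (c : Char) :
    (l ++ c :: t).drop (l.length + 1) = t := by simp

-- no class name contains an underscore (the fact the partition rewrite rests on)
theorem classes_no_us : ∀ cls ∈ CLASSES, ∀ x ∈ cls.toList, (x != '_') = true := by
  intro cls hcls
  simp only [CLASSES, List.mem_cons, List.not_mem_nil, or_false] at hcls
  rcases hcls with rfl|rfl|rfl|rfl|rfl|rfl|rfl|rfl|rfl|rfl|rfl|rfl|rfl <;> simp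

-- if no class matches with startswith, the loop returns none
theorem loopA_none (name : List Char) (L : List String)
    (h : ∀ cls ∈ L, PySem.Chars.startswith name (cls.toList ++ ['_']) = false) :
    loopA name L = none := by
  induction L with
  | nil => rfl
  | cons cls rest ih =>
      simp only [loopA, h cls (by simp)]
      exact ih (fun c hc => h c (by simp [hc]))

-- the loop on a name that splits as h ++ '_' :: t, for underscore-free classes
theorem loopA_char (L : List String) (hL : ∀ cls ∈ L, ∀ c ∈ cls.toList, (c != '_') = true)
    (h t : List Char) (hh : ∀ c ∈ h, (c != '_') = true) :
    loopA (h ++ '_' :: t) L =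
      if h ∈ L.map String.toList ∧ t ≠ [] then some (String.ofList h, String.ofList t)
      else none := by
  induction L with
  | nil => simp [loopA]
  | cons cls rest ih =>
      have hcls := hL cls (by simp)
      have ihr := ih (fun c hc x hx => hL c (by simp [hc]) x hx)
      by_cases he : cls.toList = h
      · have hs : PySem.Chars.startswith (h ++ '_' :: t) (cls.toList ++ ['_']) = true := by
          rw [PySem.Chars.startswith_iff]; exact ⟨t, by simp [he]⟩
        have hspec : PySem.List.slice (h ++ '_' :: t) (some ((cls.toList.length : Int) + 1)) none = t := by
          have : ((cls.toList.length : Int) + 1) = ((cls.toList.length + 1 : Nat) : Int) := by push_cast; ring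
          rw [this, PySem.List.slice_from_natCast, he, drop_block]
        simp only [loopA, hs, if_true, hspec]
        cases t with
        | nil =>
            simp only [List.isEmpty_nil, if_true, ihr]
            simp
        | cons a b =>
            simp only [List.isEmpty_cons, Bool.false_eq_true, if_false]
            have hcm : h ∈ (cls :: rest).map String.toList := by
              simp [← he]
            rw [if_pos ⟨hcm, by simp⟩]
            have hce : cls = String.ofList h := by rw [← he, String.ofList_toList]
            rw [hce]
      · have hs : PySem.Chars.startswith (h ++ '_' :: t) (cls.toList ++ ['_']) = false := by
          by_contra hcon
          have hb : PySem.Chars.startswith (h ++ '_' :: t) (cls.toList ++ ['_']) = true := by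
            cases hv : PySem.Chars.startswith (h ++ '_' :: t) (cls.toList ++ ['_']) with
            | false => exact absurd hv hcon
            | true => rfl
          rw [PySem.Chars.startswith_iff] at hb
          obtain ⟨r, hr⟩ := hb
          have hr' : cls.toList ++ '_' :: r = h ++ '_' :: t := by simpa using hr
          have h1 := takeWhile_us cls.toList r hcls
          have h2 := takeWhile_us h t hh
          rw [hr', h2] at h1
          exact he h1.symm
        have hmem : h ∈ (cls :: rest).map String.toList ↔ h ∈ rest.map String.toList := by
          simp only [List.map_cons, List.mem_cons]
          constructor
          · rintro (hx | hx)
            · exact absurd hx.symm he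
            · exact hx
          · exact Or.inr
        simp only [loopA, hs, Bool.false_eq_true, if_false, ihr]
        by_cases hm : h ∈ rest.map String.toList ∧ t ≠ []
        · rw [if_pos hm, if_pos ⟨hmem.mpr hm.1, hm.2⟩]
        · have hcond : ¬(h ∈ (cls :: rest).map String.toList ∧ t ≠ []) :=
            fun hx => hm ⟨hmem.mp hx.1, hx.2⟩
          rw [if_neg hm, if_neg hcond]

-- membership translated between char lists and strings
theorem mem_classes_iff (h : List Char) :
    String.ofList h ∈ CLASS_SET ↔ h ∈ CLASSES.map String.toList := by
  have hset : CLASS_SET = CLASSES := by decide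
  rw [hset]
  constructor
  · intro hx
    exact List.mem_map.mpr ⟨String.ofList h, hx, String.toList_ofList⟩
  · intro hx
    obtain ⟨s, hs, he⟩ := List.mem_map.mp hx
    rw [← he, String.ofList_toList]; exact hs

theorem core (name : List Char) :
    loopA name CLASSES =
      (if String.ofList (name.takeWhile (fun c => c != '_')) ∈ CLASS_SET ∧
          (name.dropWhile (fun c => c != '_')).tail ≠ [] then
        some (String.ofList (name.takeWhile (fun c => c != '_')),
              String.ofList ((name.dropWhile (fun c => c != '_')).tail))
      else none) := by
  cases hd : name.dropWhile (fun c => c != '_') with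
  | nil =>
      have hall : ∀ x ∈ name, (x != '_') = true := by
        rw [← List.dropWhile_eq_nil_iff]; exact hd
      rw [loopA_none]
      · simp
      · intro cls hcls
        by_contra hcon
        have hb : PySem.Chars.startswith name (cls.toList ++ ['_']) = true := by
          cases hv : PySem.Chars.startswith name (cls.toList ++ ['_']) with
          | false => exact absurd hv hcon
          | true => rfl
        rw [PySem.Chars.startswith_iff] at hb
        obtain ⟨r, hr⟩ := hb
        have : ('_' : Char) ∈ name := by
          rw [← hr]; simp
        have := hall _ this
        simp at this
  | cons c t =>
      have hne : name.dropWhile (fun c => c != '_') ≠ [] := by simp [hd]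
      have hc : (c != '_') = false := by
        have := List.head_dropWhile_not (fun c => c != '_') hne
        simpa [hd] using this
      have hc' : c = '_' := by simpa using hc
      have hsplit : name = name.takeWhile (fun c => c != '_') ++ '_' :: t := by
        conv_lhs => rw [← List.takeWhile_append_dropWhile (p := fun c => c != '_') (l := name)]
        rw [hd, hc']
      have hh : ∀ x ∈ name.takeWhile (fun c => c != '_'), (x != '_') = true :=
        fun x hx => List.mem_takeWhile_imp (p := fun c => c != '_') hx
      conv_lhs => rw [hsplit]
      rw [loopA_char CLASSES classes_no_us _ t hh]
      simp only [List.tail_cons]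
      by_cases hm : name.takeWhile (fun c => c != '_') ∈ CLASSES.map String.toList ∧ t ≠ []
      · rw [if_pos hm, if_pos ⟨(mem_classes_iff _).mpr hm.1, hm.2⟩]
      · rw [if_neg hm, if_neg (fun hx => hm ⟨(mem_classes_iff _).mp hx.1, hx.2⟩)]

-- ===== VERDICT (by name: the statement is the Claim_ definition above) =====
theorem parse_class_spec_spec : Claim_equal_parse_class_spec := by
  intro filename _
  unfold Spec_parse_class_spec parse_class_spec parse_class_spec_alt
  exact core _
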